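-- pv_equiv track=rewrite | github.com/lelimat/machine_learning_in_production_dailydrip | app/flask_app.py | data_to_dummies
-- ===== SOURCE A (Python) =====
-- def data_to_dummies(feature_dict, column_names):
--     values = [] # list of 0/1 values to be return (new row)
--     for col in column_names: # Original columns with the dummies
--         for key in feature_dict.keys():
--             if col.startswith(key):
--                 value = col[len(key)+1:]
--                 if feature_dict[key] == value:
--                     values.append(1)
--                 else:
--                     values.append(0)
--     return values
-- ===== SOURCE B (Python) =====
-- def data_to_dummies(feature_dict, column_names):
--     # Index each key by its insertion position and value; probe each column's
--     # prefixes against the index instead of scanning all keys per column.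
--     index = {k: (i, v) for i, (k, v) in enumerate(feature_dict.items())}
--     values = []
--     for col in column_names:
--         matches = []
--         for j in range(len(col) + 1):
--             hit = index.get(col[:j])
--             if hit is not None:
--                 i, v = hit
--                 matches.append((i, 1 if v == col[j + 1:] else 0))
--         matches.sort(key=lambda t: t[0])
--         for _, bit in matches:
--             values.append(bit)
--     return values
-- ===== Notes on version B (the rewrite author's own statement) =====
-- stated objective: faster
-- what changed: Instead of testing every dict key against every column with startswith (O(C*K*L)), B builds a key->(position,value) index once and, per column, probes only the column's len+1 prefixes in the index, then orders the hits by dict position.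
import Mathlib
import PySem

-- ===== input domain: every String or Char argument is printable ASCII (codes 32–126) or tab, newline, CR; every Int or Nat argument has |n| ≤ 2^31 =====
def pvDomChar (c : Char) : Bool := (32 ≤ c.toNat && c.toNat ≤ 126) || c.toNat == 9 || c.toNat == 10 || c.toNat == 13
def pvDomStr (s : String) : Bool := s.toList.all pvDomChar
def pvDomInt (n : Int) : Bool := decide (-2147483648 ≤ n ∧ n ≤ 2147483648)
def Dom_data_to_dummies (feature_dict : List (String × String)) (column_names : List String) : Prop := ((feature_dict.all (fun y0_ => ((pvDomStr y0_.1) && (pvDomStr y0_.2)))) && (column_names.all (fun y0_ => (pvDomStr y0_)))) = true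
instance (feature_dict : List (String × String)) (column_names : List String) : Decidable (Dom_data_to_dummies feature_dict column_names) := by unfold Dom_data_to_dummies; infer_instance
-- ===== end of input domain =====

-- B replaces A's scan of every dict key per column (startswith each) by probing the
-- column's prefixes in a key→(position, value) index and ordering hits by position.

-- ===== PORT A =====
def data_to_dummies (feature_dict : List (String × String)) (column_names : List String) : List Int :=
  column_names.foldl (fun values col =>
    ((PySem.Dict.mk feature_dict).keys).foldl (fun values key =>
      if PySem.Str.startswith col key then
        let value := PySem.Str.slice col (some (PySem.Str.len key + 1)) none
        if (PySem.Dict.mk feature_dict).get? key == some value then values ++ [(1 : Int)]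
        else values ++ [(0 : Int)]
      else values) values) []

-- ===== PORT B =====
-- the dict comprehension 'index = {k: (i, v) for i, (k, v) in enumerate(feature_dict.items())}'
def pvIndex (feature_dict : List (String × String)) : PySem.Dict String (Int × String) :=
  (PySem.List.enumerate feature_dict 0).foldl
    (fun d p => d.insert p.2.1 (p.1, p.2.2)) PySem.Dict.empty

def data_to_dummies_alt (feature_dict : List (String × String)) (column_names : List String) : List Int :=
  let index := pvIndex feature_dict
  column_names.foldl (fun values col =>
    let hits : List (Int × Int) :=
      (PySem.List.pyRange 0 (PySem.Str.len col + 1)).foldl (fun ms j =>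
        match index.get? (PySem.Str.slice col none (some j)) with
        | some (i, v) =>
            ms ++ [(i, if v == PySem.Str.slice col (some (j + 1)) none then (1 : Int) else 0)]
        | none => ms) []
    (PySem.List.sorted hits (fun t => t.1)).foldl
      (fun values t => values ++ [t.2]) values) []

-- ===== PRECONDITION & SPEC =====
-- feature_dict stands for a Python dict, whose keys are necessarily distinct; Pre_
-- excludes only association lists with duplicate keys, which no dict produces.
def Pre_data_to_dummies (feature_dict : List (String × String)) (column_names : List String) : Prop :=
  (feature_dict.map Prod.fst).Nodup
instance (feature_dict : List (String × String)) (column_names : List String) : Decidable (Pre_data_to_dummies feature_dict column_names) := by unfold Pre_data_to_dummies; infer_instance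

def pvWitness_data_to_dummies : (List (String × String)) × List String :=
  ([("color", "red"), ("size", "L")], ["color_red", "color_blue", "size_L"])

def Spec_data_to_dummies (feature_dict : List (String × String)) (column_names : List String) (out : List Int) : Prop := out = data_to_dummies_alt feature_dict column_names
instance (feature_dict : List (String × String)) (column_names : List String) (out : List Int) : Decidable (Spec_data_to_dummies feature_dict column_names out) := by unfold Spec_data_to_dummies; infer_instance

-- ===== CLAIM (what is proved, stated in full; the proofs are below) =====
def Claim_equal_data_to_dummies : Prop := ∀ (feature_dict : List (String × String)) (column_names : List String), Dom_data_to_dummies feature_dict column_names → Pre_data_to_dummies feature_dict column_names → Spec_data_to_dummies feature_dict column_names (data_to_dummies feature_dict column_names)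

-- ===== LEMMAS AND PROOFS =====

-- the one-column hit list B builds (inner loop of the port, as a flatMap)
def pvHits (feature_dict : List (String × String)) (col : String) (j : Int) : List (Int × Int) :=
  match (pvIndex feature_dict).get? (PySem.Str.slice col none (some j)) with
  | some (i, v) =>
      [(i, if v == PySem.Str.slice col (some (j + 1)) none then (1 : Int) else 0)]
  | none => []

def pvMatches (feature_dict : List (String × String)) (col : String) : List (Int × Int) :=
  (PySem.List.pyRange 0 (PySem.Str.len col + 1)).flatMap (pvHits feature_dict col)

-- the hits in dict order
def pvT (feature_dict : List (String × String)) (col : String) : List (Int × Int) :=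
  ((PySem.List.enumerate feature_dict 0).filter (fun p => PySem.Str.startswith col p.2.1)).map
    (fun p => (p.1, if p.2.2 == PySem.Str.slice col (some (PySem.Str.len p.2.1 + 1)) none then (1 : Int) else 0))

theorem enum_map_key (fd : List (String × String)) (s : Int) :
    (PySem.List.enumerate fd s).map (fun p => p.2.1) = fd.map Prod.fst := by
  have h := PySem.List.map_snd_enumerate fd s
  calc (PySem.List.enumerate fd s).map (fun p => p.2.1)
      = ((PySem.List.enumerate fd s).map (fun p => p.2)).map Prod.fst := by
        rw [List.map_map]; rfl
    _ = fd.map Prod.fst := by rw [h]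

theorem pvIndex_keys (fd : List (String × String)) :
    (pvIndex fd).keys = PySem.Set.ofList (fd.map Prod.fst) := by
  unfold pvIndex
  rw [PySem.Dict.keys_foldl_insert_key]
  rw [enum_map_key]
  have : (PySem.Dict.empty : PySem.Dict String (Int × String)).keys = [] := rfl
  rw [this, PySem.Set.update_nil_left]

theorem slice_toList (col : String) (j : Int) (hj : 0 ≤ j) :
    (PySem.Str.slice col none (some j)).toList = col.toList.take j.toNat := by
  simp [PySem.Str.slice]
  exact PySem.List.slice_to _ hj

theorem startswith_of_slice_eq (col k : String) (j : Int) (hj : 0 ≤ j)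
    (h : PySem.Str.slice col none (some j) = k) : PySem.Str.startswith col k = true := by
  rw [PySem.Str.startswith_eq, PySem.Chars.startswith_iff, ← h, slice_toList col j hj]
  exact List.take_prefix _ _

theorem slice_ne_of_len (col k : String) (j : Int) (hj : 0 ≤ j)
    (hjL : j ≤ (col.toList.length : Int)) (hne : j.toNat ≠ k.toList.length) :
    PySem.Str.slice col none (some j) ≠ k := by
  intro h
  apply hne
  have h2 : (PySem.Str.slice col none (some j)).toList = k.toList := by rw [h]
  rw [slice_toList col j hj] at h2
  have h3 := congrArg List.length h2
  rw [List.length_take] at h3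
  omega

theorem pvIndex_append (fd : List (String × String)) (k v : String) :
    pvIndex (fd ++ [(k, v)]) = (pvIndex fd).insert k ((fd.length : Int), v) := by
  unfold pvIndex
  rw [PySem.List.enumerate_append]
  rw [show (0 : Int) + (fd.length : Int) = (fd.length : Int) by ring]
  rw [List.foldl_append]
  rfl

theorem fresh_none (fd : List (String × String)) (k : String) (hk : k ∉ fd.map Prod.fst) :
    (pvIndex fd).get? k = none := by
  rw [PySem.Dict.get?_eq_none_iff_not_mem_keys, pvIndex_keys]
  intro hmem
  exact hk ((PySem.Set.mem_ofList _ _).1 hmem)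

theorem pvHits_append_ne (fd : List (String × String)) (k v col : String) (j : Int)
    (hne : PySem.Str.slice col none (some j) ≠ k) :
    pvHits (fd ++ [(k, v)]) col j = pvHits fd col j := by
  unfold pvHits
  rw [pvIndex_append, PySem.Dict.get?_insert, if_neg hne]

theorem pvHits_append_self (fd : List (String × String)) (k v col : String) (j : Int)
    (heq : PySem.Str.slice col none (some j) = k) :
    pvHits (fd ++ [(k, v)]) col j
      = [((fd.length : Int),
          if v == PySem.Str.slice col (some (j + 1)) none then (1 : Int) else 0)] := by
  unfold pvHits
  rw [pvIndex_append, PySem.Dict.get?_insert, if_pos heq]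

theorem pvT_perm_pvMatches (fd : List (String × String)) (col : String)
    (hnd : (fd.map Prod.fst).Nodup) :
    (pvT fd col).Perm (pvMatches fd col) := by
  induction fd using List.reverseRecOn with
  | nil =>
      have h2 : pvMatches [] col = [] := by
        unfold pvMatches
        rw [List.flatMap_congr (g := fun _ => ([] : List (Int × Int)))
          (by intro j _
              unfold pvHits
              rw [show pvIndex ([] : List (String × String)) = PySem.Dict.empty from rfl,
                PySem.Dict.get?_empty])]
        simp
      rw [show pvT [] col = [] from rfl, h2]
  | append_singleton fd kv ih =>
      obtain ⟨k, v⟩ := kv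
      rw [List.map_append, List.nodup_append] at hnd
      obtain ⟨hnd', hk1, hdisj⟩ := hnd
      have hk : k ∉ fd.map Prod.fst := by
        intro hmem
        exact hdisj k hmem k (by simp) rfl
      have ihp := ih hnd'
      have hT : pvT (fd ++ [(k, v)]) col
          = pvT fd col ++ (if PySem.Str.startswith col k then
              [((fd.length : Int),
                if v == PySem.Str.slice col (some ((k.toList.length : Int) + 1)) none
                then (1 : Int) else 0)]
            else []) := by
        unfold pvT
        rw [PySem.List.enumerate_append, List.filter_append, List.map_append]
        rw [show (0 : Int) + (fd.length : Int) = (fd.length : Int) by ring]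
        congr 1
        by_cases hst : PySem.Str.startswith col k
        · rw [PySem.Str.startswith_eq] at hst
          simp [hst, PySem.Str.len_eq]
        · rw [PySem.Str.startswith_eq] at hst
          simp [hst]
      by_cases hst : PySem.Str.startswith col k
      · -- k is a prefix of col: one new hit appears, at index j0 = len k
        have hpre : k.toList <+: col.toList :=
          (PySem.Chars.startswith_iff _ _).1 (by rw [← PySem.Str.startswith_eq]; exact hst)
        have hj0L : (k.toList.length : Int) ≤ (col.toList.length : Int) := by
          exact_mod_cast hpre.length_le
        have heq0 : PySem.Str.slice col none (some (k.toList.length : Int)) = k := by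
          rw [← String.toList_inj, slice_toList col _ (by positivity), Int.toNat_natCast]
          exact (List.prefix_iff_eq_take.1 hpre).symm
        have hsplit : PySem.List.pyRange 0 (PySem.Str.len col + 1)
            = PySem.List.pyRange 0 (k.toList.length : Int)
              ++ ([(k.toList.length : Int)]
                ++ PySem.List.pyRange ((k.toList.length : Int) + 1) (PySem.Str.len col + 1)) := by
          rw [PySem.Str.len_eq]
          rw [PySem.List.pyRange_one_append 0 (k.toList.length : Int)
            ((col.toList.length : Int) + 1) (by positivity) (by omega)]
          rw [PySem.List.pyRange_one_append (k.toList.length : Int)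
            ((k.toList.length : Int) + 1) ((col.toList.length : Int) + 1) (by omega) (by omega)]
          rw [PySem.List.pyRange_one_singleton]
        have hne_lo : ∀ j ∈ PySem.List.pyRange 0 (k.toList.length : Int),
            PySem.Str.slice col none (some j) ≠ k := by
          intro j hj
          obtain ⟨hj1, hj2⟩ := PySem.List.mem_pyRange_one.1 hj
          exact slice_ne_of_len col k j hj1 (by omega) (by omega)
        have hne_hi : ∀ j ∈ PySem.List.pyRange ((k.toList.length : Int) + 1) (PySem.Str.len col + 1),
            PySem.Str.slice col none (some j) ≠ k := by
          intro j hj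
          obtain ⟨hj1, hj2⟩ := PySem.List.mem_pyRange_one.1 hj
          rw [PySem.Str.len_eq] at hj2
          exact slice_ne_of_len col k j (by omega) (by omega) (by omega)
        have hmid : pvHits fd col (k.toList.length : Int) = [] := by
          unfold pvHits
          rw [heq0, fresh_none fd k hk]
        have hM : pvMatches (fd ++ [(k, v)]) col
            = (PySem.List.pyRange 0 (k.toList.length : Int)).flatMap (pvHits fd col)
              ++ (((fd.length : Int),
                    if v == PySem.Str.slice col (some ((k.toList.length : Int) + 1)) none
                    then (1 : Int) else 0)
                :: (PySem.List.pyRange ((k.toList.length : Int) + 1)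
                      (PySem.Str.len col + 1)).flatMap (pvHits fd col)) := by
          unfold pvMatches
          rw [hsplit, List.flatMap_append, List.flatMap_append]
          rw [List.flatMap_congr (fun j hj => pvHits_append_ne fd k v col j (hne_lo j hj))]
          rw [List.flatMap_congr (fun j hj => pvHits_append_ne fd k v col j (hne_hi j hj))]
          rw [show ([(k.toList.length : Int)]).flatMap (pvHits (fd ++ [(k, v)]) col)
              = pvHits (fd ++ [(k, v)]) col (k.toList.length : Int) ++ [] from rfl]
          rw [pvHits_append_self fd k v col _ heq0]
          rfl
        have hM' : pvMatches fd col
            = (PySem.List.pyRange 0 (k.toList.length : Int)).flatMap (pvHits fd col)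
              ++ (PySem.List.pyRange ((k.toList.length : Int) + 1)
                    (PySem.Str.len col + 1)).flatMap (pvHits fd col) := by
          unfold pvMatches
          rw [hsplit, List.flatMap_append, List.flatMap_append]
          rw [show ([(k.toList.length : Int)]).flatMap (pvHits fd col)
              = pvHits fd col (k.toList.length : Int) ++ [] from rfl]
          rw [hmid]
          rfl
        rw [hT, if_pos hst, hM]
        refine (List.perm_append_singleton _ _).trans (List.Perm.trans ?_ List.perm_middle.symm)
        exact (hM' ▸ ihp).cons _
      · -- k matches no prefix of col: nothing changes
        have hmeq : pvMatches (fd ++ [(k, v)]) col = pvMatches fd col := by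
          unfold pvMatches
          apply List.flatMap_congr
          intro j hj
          obtain ⟨hj1, _⟩ := PySem.List.mem_pyRange_one.1 hj
          apply pvHits_append_ne
          intro heq
          exact hst (startswith_of_slice_eq col k j hj1 heq)
        rw [hT, if_neg hst, List.append_nil, hmeq]
        exact ihp

theorem pvT_pairwise (fd : List (String × String)) (col : String) :
    (pvT fd col).Pairwise (fun a b => a.1 < b.1) := by
  unfold pvT
  apply List.Pairwise.map (R := fun p q : Int × (String × String) => p.1 < q.1)
  · intro a b h; exact h
  · exact List.Pairwise.filter _ (PySem.List.pairwise_lt_enumerate fd 0)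

theorem sorted_pvMatches (fd : List (String × String)) (col : String)
    (hnd : (fd.map Prod.fst).Nodup) :
    PySem.List.sorted (pvMatches fd col) (fun t => t.1) = pvT fd col :=
  PySem.List.sorted_eq_of_perm_of_pairwise_lt _ _ _
    (pvT_perm_pvMatches fd col hnd) (pvT_pairwise fd col)

theorem enum_filter_map_snd {β : Type} (fd : List (String × String)) (s : Int)
    (P : String × String → Bool) (g : String × String → β) :
    (((PySem.List.enumerate fd s).filter (fun p => P p.2)).map (fun p => g p.2))
      = (fd.filter P).map g := by
  induction fd generalizing s with
  | nil => rfl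
  | cons kv rest ih =>
      rw [show PySem.List.enumerate (kv :: rest) s = (s, kv) :: PySem.List.enumerate rest (s + 1) from rfl]
      simp only [List.filter_cons]
      by_cases h : P kv
      · simp [h, ih (s + 1)]
      · simp [h, ih (s + 1)]

theorem pvT_map_snd (fd : List (String × String)) (col : String)
    (hnd : (fd.map Prod.fst).Nodup) :
    (pvT fd col).map (fun t => t.2)
      = ((fd.map Prod.fst).filter (fun k => PySem.Str.startswith col k)).map
          (fun key => if (PySem.Dict.mk fd).get? key
              == some (PySem.Str.slice col (some (PySem.Str.len key + 1)) none)
            then (1 : Int) else 0) := by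
  have h1 : (pvT fd col).map (fun t => t.2)
      = (fd.filter (fun kv => PySem.Str.startswith col kv.1)).map
          (fun kv => if kv.2 == PySem.Str.slice col (some (PySem.Str.len kv.1 + 1)) none
            then (1 : Int) else 0) := by
    unfold pvT
    rw [List.map_map]
    exact enum_filter_map_snd fd 0 (fun kv => PySem.Str.startswith col kv.1)
      (fun kv => if kv.2 == PySem.Str.slice col (some (PySem.Str.len kv.1 + 1)) none
        then (1 : Int) else 0)
  rw [h1, List.filter_map, List.map_map]
  apply List.map_congr_left
  intro kv hkv
  have hmem : kv ∈ fd := List.mem_of_mem_filter hkv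
  have hget : (PySem.Dict.mk fd).get? kv.1 = some kv.2 := by
    apply PySem.Dict.get?_of_mem_items
    · show (kv.1, kv.2) ∈ fd
      simpa using hmem
    · show (fd.map Prod.fst).Nodup
      exact hnd
  simp [Function.comp, hget]

-- ===== VERDICT (by name: the statement is the Claim_ definition above) =====
theorem data_to_dummies_spec : Claim_equal_data_to_dummies := by
  intro fd cols _hdom hpre
  unfold Spec_data_to_dummies data_to_dummies data_to_dummies_alt
  apply PySem.List.foldl_congr_mem
  intro values col _hcol
  -- A's inner loop
  rw [PySem.List.foldl_congr_mem ((PySem.Dict.mk fd).keys)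
    _ (fun values key => if PySem.Str.startswith col key then values ++
        [if (PySem.Dict.mk fd).get? key
            == some (PySem.Str.slice col (some (PySem.Str.len key + 1)) none)
          then (1 : Int) else 0] else values) values
    (by intro acc key _; dsimp only; split_ifs <;> rfl)]
  rw [PySem.List.foldl_append_if]
  -- B's inner loop
  rw [PySem.List.foldl_congr_mem (PySem.List.pyRange 0 (PySem.Str.len col + 1))
    _ (fun ms j => ms ++ pvHits fd col j) []
    (by intro ms j _
        cases h : (pvIndex fd).get? (PySem.Str.slice col none (some j)) with
        | none => simp [pvHits, h]
        | some iv => cases iv; simp [pvHits, h])]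
  rw [PySem.List.foldl_append_eq_flatMap (pvHits fd col)
    (PySem.List.pyRange 0 (PySem.Str.len col + 1)) []]
  rw [List.nil_append]
  rw [show (PySem.List.pyRange 0 (PySem.Str.len col + 1)).flatMap (pvHits fd col) = pvMatches fd col from rfl]
  dsimp only
  rw [sorted_pvMatches fd col hpre]
  rw [PySem.List.foldl_append_singleton_eq_map (fun t : Int × Int => t.2) (pvT fd col) values]
  rw [pvT_map_snd fd col hpre]
  rfl
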